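-- pv_equiv track=rewrite | github.com/Mrgtee/SafeCode | app/main.py | detect_main_language
-- ===== SOURCE A (Python) =====
-- from typing import Any, Dict, List, Optional
--
-- def detect_main_language(paths: List[str]) -> str:
--     counts = {"python": 0, "javascript": 0, "typescript": 0}
--     for path in paths:
--         if path.endswith(".py"):
--             counts["python"] += 1
--         elif path.endswith((".js", ".jsx")):
--             counts["javascript"] += 1
--         elif path.endswith((".ts", ".tsx")):
--             counts["typescript"] += 1
--     return max(counts, key=counts.get) if paths else "unknown"
-- ===== SOURCE B (Python) =====
-- def detect_main_language(paths):
--     if not paths: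
--         return "unknown"
--     best_lang, best_count = "unknown", -1
--     for lang, exts in [("python", (".py",)),
--                        ("javascript", (".js", ".jsx")),
--                        ("typescript", (".ts", ".tsx"))]:
--         c = sum(p.endswith(exts) for p in paths)
--         if c > best_count:
--             best_lang, best_count = lang, c
--     return best_lang
-- ===== Notes on version B (the rewrite author's own statement) =====
-- stated objective: alternative
-- what changed: Replaces the single branching pass that mutates a counts dict followed by max(counts, key=...) with three independent per-language suffix scans (relying on the extensions being mutually exclusive) and an explicit running-best selection in the same python→javascript→typescript tie-break order.
import Mathlib
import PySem

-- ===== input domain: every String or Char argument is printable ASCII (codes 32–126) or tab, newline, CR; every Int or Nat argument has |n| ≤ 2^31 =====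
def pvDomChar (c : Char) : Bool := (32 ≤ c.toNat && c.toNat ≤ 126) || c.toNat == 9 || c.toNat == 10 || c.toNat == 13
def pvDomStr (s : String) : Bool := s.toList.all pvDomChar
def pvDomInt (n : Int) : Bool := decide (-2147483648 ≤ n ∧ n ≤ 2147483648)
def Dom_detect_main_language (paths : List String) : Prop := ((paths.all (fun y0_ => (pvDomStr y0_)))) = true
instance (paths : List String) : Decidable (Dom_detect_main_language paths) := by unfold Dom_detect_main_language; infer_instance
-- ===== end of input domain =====

-- B replaces A's single branching pass over a mutated counts dict + max(counts, key=…) by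
-- three independent per-language suffix scans and an explicit running-best selection
-- in the same python→javascript→typescript tie-break order (objective: alternative).

-- ===== PORT A =====
def detect_main_language (paths : List String) : String :=
  let counts : PySem.Dict String Int :=
    paths.foldl (fun counts path =>
      if PySem.Str.endswith path ".py" then
        counts.insert "python" (counts.getD "python" 0 + 1)
      else if PySem.Str.endswith path ".js" || PySem.Str.endswith path ".jsx" then
        counts.insert "javascript" (counts.getD "javascript" 0 + 1)
      else if PySem.Str.endswith path ".ts" || PySem.Str.endswith path ".tsx" then
        counts.insert "typescript" (counts.getD "typescript" 0 + 1)
      else counts)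
      (PySem.Dict.ofList [("python", 0), ("javascript", 0), ("typescript", 0)])
  -- max(counts, key=counts.get): all three keys are present, so counts.get k = counts.getD k 0 exactly
  match paths with
  | [] => "unknown"
  | _ => (PySem.List.max? counts.keys (fun k => counts.getD k 0)).getD "unknown"

-- ===== PORT B =====
-- sum(p.endswith(exts) for p in paths)
def pvLangCount (paths : List String) (exts : List String) : Int :=
  paths.foldl (fun acc p => acc + (if exts.any (fun e => PySem.Str.endswith p e) then 1 else 0)) 0

def detect_main_language_alt (paths : List String) : String :=
  if paths = [] then "unknown"
  else
    (([("python", [".py"]), ("javascript", [".js", ".jsx"]), ("typescript", [".ts", ".tsx"])]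
        : List (String × List String)).foldl
      (fun (best : String × Int) le =>
        let c := pvLangCount paths le.2
        if c > best.2 then (le.1, c) else best)
      ("unknown", -1)).1

-- ===== PRECONDITION & SPEC =====
def Spec_detect_main_language (paths : List String) (out : String) : Prop := out = detect_main_language_alt paths
instance (paths : List String) (out : String) : Decidable (Spec_detect_main_language paths out) := by unfold Spec_detect_main_language; infer_instance

-- ===== CLAIM (what is proved, stated in full; the proofs are below) =====
def Claim_equal_detect_main_language : Prop := ∀ (paths : List String), Dom_detect_main_language paths → Spec_detect_main_language paths (detect_main_language paths)

-- ===== LEMMAS AND PROOFS =====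

-- proof-only abbreviations for the three suffix tests
def pvPy (p : String) : Bool := PySem.Str.endswith p ".py"
def pvJs (p : String) : Bool := PySem.Str.endswith p ".js" || PySem.Str.endswith p ".jsx"
def pvTs (p : String) : Bool := PySem.Str.endswith p ".ts" || PySem.Str.endswith p ".tsx"

lemma pv_ends_excl {s u v : List Char} (hle : u.length ≤ v.length) (hnot : ¬ u <:+ v)
    (hu : PySem.Chars.endswith s u = true) (hv : PySem.Chars.endswith s v = true) : False := by
  rw [PySem.Chars.endswith_iff] at hu hv
  exact hnot (List.suffix_of_suffix_length_le hu hv hle)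

-- the three extension groups are mutually exclusive
lemma pvJs_not_py (p : String) (h : pvJs p = true) : pvPy p = false := by
  cases hpy : pvPy p with
  | false => rfl
  | true =>
    exfalso
    simp only [pvJs, pvPy, Bool.or_eq_true, PySem.Str.endswith_eq] at h hpy
    rcases h with h | h
    · exact pv_ends_excl (by decide) (by decide) hpy h
    · exact pv_ends_excl (by decide) (by decide) hpy h

lemma pvTs_not_py (p : String) (h : pvTs p = true) : pvPy p = false := by
  cases hpy : pvPy p with
  | false => rfl
  | true =>
    exfalso
    simp only [pvTs, pvPy, Bool.or_eq_true, PySem.Str.endswith_eq] at h hpy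
    rcases h with h | h
    · exact pv_ends_excl (by decide) (by decide) hpy h
    · exact pv_ends_excl (by decide) (by decide) hpy h

lemma pvTs_not_js (p : String) (h : pvTs p = true) : pvJs p = false := by
  cases hjs : pvJs p with
  | false => rfl
  | true =>
    exfalso
    simp only [pvTs, pvJs, Bool.or_eq_true, PySem.Str.endswith_eq] at h hjs
    rcases h with h | h <;> rcases hjs with hj | hj
    · exact pv_ends_excl (by decide) (by decide) hj h
    · exact pv_ends_excl (by decide) (by decide) h hj
    · exact pv_ends_excl (by decide) (by decide) hj h
    · exact pv_ends_excl (by decide) (by decide) hj h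

-- invariant of A's counting loop
lemma pv_countsA (paths : List String) (a b c : Int) :
    paths.foldl (fun counts path =>
      if PySem.Str.endswith path ".py" then
        counts.insert "python" (counts.getD "python" 0 + 1)
      else if PySem.Str.endswith path ".js" || PySem.Str.endswith path ".jsx" then
        counts.insert "javascript" (counts.getD "javascript" 0 + 1)
      else if PySem.Str.endswith path ".ts" || PySem.Str.endswith path ".tsx" then
        counts.insert "typescript" (counts.getD "typescript" 0 + 1)
      else counts)
      (PySem.Dict.mk [("python", a), ("javascript", b), ("typescript", c)])
    = PySem.Dict.mk [("python", a + paths.countP pvPy),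
        ("javascript", b + paths.countP (fun p => !pvPy p && pvJs p)),
        ("typescript", c + paths.countP (fun p => !pvPy p && !pvJs p && pvTs p))] := by
  induction paths generalizing a b c with
  | nil => simp
  | cons p l ih =>
    rw [List.foldl_cons]
    by_cases hpy : PySem.Str.endswith p ".py"
    · have hpy' : pvPy p = true := hpy
      simp only [hpy, if_true]
      have hins : (PySem.Dict.mk [("python", a), ("javascript", b), ("typescript", c)]).insert
          "python" ((PySem.Dict.mk [("python", a), ("javascript", b), ("typescript", c)]).getD "python" 0 + 1)
          = PySem.Dict.mk [("python", a + 1), ("javascript", b), ("typescript", c)] := by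
        simp [PySem.Dict.insert, PySem.Dict.getD, PySem.Dict.get?, PySem.Dict.contains]
      rw [hins, ih]
      simp only [List.countP_cons, hpy', Bool.not_true, Bool.false_and, if_true,
        PySem.Dict.mk.injEq, List.cons.injEq, Prod.mk.injEq, and_true, true_and]
      refine ⟨by omega, by simp, by simp⟩
    · have hpy' : pvPy p = false := by simpa [pvPy] using hpy
      by_cases hjs : (PySem.Str.endswith p ".js" || PySem.Str.endswith p ".jsx") = true
      · have hjs' : pvJs p = true := hjs
        simp only [hpy, hjs, if_true, if_false, Bool.false_eq_true]
        have hins : (PySem.Dict.mk [("python", a), ("javascript", b), ("typescript", c)]).insert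
            "javascript" ((PySem.Dict.mk [("python", a), ("javascript", b), ("typescript", c)]).getD "javascript" 0 + 1)
            = PySem.Dict.mk [("python", a), ("javascript", b + 1), ("typescript", c)] := by
          simp [PySem.Dict.insert, PySem.Dict.getD, PySem.Dict.get?, PySem.Dict.contains]
        rw [hins, ih]
        simp only [List.countP_cons, hpy', hjs', Bool.not_false, Bool.true_and, if_true,
          PySem.Dict.mk.injEq, List.cons.injEq, Prod.mk.injEq, and_true, true_and]
        refine ⟨by simp, by omega, by simp⟩
      · have hjs' : pvJs p = false := by simpa [pvJs] using hjs
        by_cases hts : (PySem.Str.endswith p ".ts" || PySem.Str.endswith p ".tsx") = true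
        · have hts' : pvTs p = true := hts
          simp only [hpy, hjs, hts, if_true, if_false, Bool.false_eq_true]
          have hins : (PySem.Dict.mk [("python", a), ("javascript", b), ("typescript", c)]).insert
              "typescript" ((PySem.Dict.mk [("python", a), ("javascript", b), ("typescript", c)]).getD "typescript" 0 + 1)
              = PySem.Dict.mk [("python", a), ("javascript", b), ("typescript", c + 1)] := by
            simp [PySem.Dict.insert, PySem.Dict.getD, PySem.Dict.get?, PySem.Dict.contains]
          rw [hins, ih]
          simp only [List.countP_cons, hpy', hjs', hts', Bool.not_false, Bool.true_and,
            Bool.and_true, if_true,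
            PySem.Dict.mk.injEq, List.cons.injEq, Prod.mk.injEq, and_true, true_and]
          refine ⟨by simp, by simp, by omega⟩
        · have hts' : pvTs p = false := by simpa [pvTs] using hts
          simp only [hpy, hjs, hts, if_false, Bool.false_eq_true]
          rw [ih]
          simp [hpy', hjs', hts']

-- B's per-language scan is a countP
lemma pv_langCount_eq (paths : List String) (exts : List String) :
    pvLangCount paths exts = (paths.countP (fun p => exts.any (fun e => PySem.Str.endswith p e)) : Int) := by
  unfold pvLangCount
  rw [PySem.List.foldl_add]
  rw [PySem.List.sum_map_ite_one_zero]
  simp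

-- drop the elif context from A's javascript/typescript counts (the suffix groups exclude each other)
lemma pv_countJs (paths : List String) :
    paths.countP (fun p => !pvPy p && pvJs p) = paths.countP pvJs := by
  apply List.countP_congr
  intro p _
  cases hjs : pvJs p
  · simp
  · simp [pvJs_not_py p hjs]

lemma pv_countTs (paths : List String) :
    paths.countP (fun p => !pvPy p && !pvJs p && pvTs p) = paths.countP pvTs := by
  apply List.countP_congr
  intro p _
  cases hts : pvTs p
  · simp
  · simp [pvTs_not_py p hts, pvTs_not_js p hts]

-- ===== VERDICT (by name: the statement is the Claim_ definition above) =====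
theorem detect_main_language_spec : Claim_equal_detect_main_language := by
  intro paths _
  unfold Spec_detect_main_language detect_main_language detect_main_language_alt
  cases paths with
  | nil => rfl
  | cons p l =>
    have hA := pv_countsA (p :: l) 0 0 0
    simp only [PySem.Dict.ofList] at *
    rw [show (PySem.Dict.empty.update [(("python" : String), (0 : Int)), ("javascript", 0), ("typescript", 0)])
        = PySem.Dict.mk [("python", 0), ("javascript", 0), ("typescript", 0)] from rfl]
    rw [hA]
    rw [pv_countJs, pv_countTs]
    simp only [List.foldl_cons, List.foldl_nil,
      pv_langCount_eq, List.any_cons, List.any_nil, Bool.or_false]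
    have hP : (p :: l).countP (fun q => PySem.Str.endswith q ".py") = (p :: l).countP pvPy := rfl
    have hJ : (p :: l).countP (fun q => PySem.Str.endswith q ".js" || PySem.Str.endswith q ".jsx")
        = (p :: l).countP pvJs := rfl
    have hT : (p :: l).countP (fun q => PySem.Str.endswith q ".ts" || PySem.Str.endswith q ".tsx")
        = (p :: l).countP pvTs := rfl
    rw [hP, hJ, hT]
    set P := (p :: l).countP pvPy with hPdef
    set J := (p :: l).countP pvJs with hJdef
    set T := (p :: l).countP pvTs with hTdef
    simp [PySem.List.max?, PySem.Dict.keys, PySem.Dict.getD, PySem.Dict.get?, List.find?]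
    have hP : (-1 : Int) < (P : Int) := by omega
    by_cases h1 : P < J <;> by_cases h2 : J < T <;>
      by_cases h3 : P < T <;>
        simp [h1, h2, h3, hP]
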